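-- pv_equiv track=rewrite | github.com/SCUNLP/E2EDev | HITL-MAA/HITL_MAA/requirement_gen_MAS_per_scenario.py | split_scenarios
-- ===== SOURCE A (Python) =====
-- def split_scenarios(gherkin_code):
--     """Split the Feature header and each Scenario in the Gherkin code"""
--     lines = gherkin_code.strip().split("\n")
--
--     feature_header = []
--     scenarios = []
--     current_scenario = []
--
--     for line in lines:
--         if line.strip().startswith("Scenario:"):
--             if current_scenario:
--                 scenarios.append("\n".join(current_scenario))
--             current_scenario = [line]
--         elif current_scenario:
--             current_scenario.append(line)
--         else:
--             feature_header.append(line)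
--
--     if current_scenario:
--         scenarios.append("\n".join(current_scenario))
--
--     return "\n".join(feature_header), scenarios
-- ===== SOURCE B (Python) =====
-- def split_scenarios(gherkin_code):
--     """Split the Feature header and each Scenario: two-phase — collect boundary indices, then slice."""
--     lines = gherkin_code.strip().split("\n")
--     bounds = [i for i, line in enumerate(lines) if line.strip().startswith("Scenario:")]
--     bounds.append(len(lines))
--     header = "\n".join(lines[:bounds[0]])
--     scenarios = ["\n".join(lines[a:b]) for a, b in zip(bounds, bounds[1:])]
--     return header, scenarios
-- ===== Notes on version B (the rewrite author's own statement) =====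
-- stated objective: alternative
-- what changed: Replaced A's stateful single-pass accumulator (header/scenarios/current lists updated per line) by a two-phase decomposition: collect the boundary line indices with enumerate, then build the header and every scenario by slicing between consecutive boundaries.
import Mathlib
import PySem

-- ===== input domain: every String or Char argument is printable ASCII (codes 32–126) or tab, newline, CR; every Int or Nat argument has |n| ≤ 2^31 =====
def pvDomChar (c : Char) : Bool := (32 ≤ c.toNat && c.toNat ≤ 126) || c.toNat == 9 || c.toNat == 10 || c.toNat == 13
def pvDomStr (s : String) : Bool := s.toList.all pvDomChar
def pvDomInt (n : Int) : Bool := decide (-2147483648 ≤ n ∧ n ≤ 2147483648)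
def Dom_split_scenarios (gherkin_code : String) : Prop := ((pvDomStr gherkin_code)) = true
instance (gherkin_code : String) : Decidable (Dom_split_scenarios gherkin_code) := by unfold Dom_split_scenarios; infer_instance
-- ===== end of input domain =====

-- B replaces A's stateful single-pass accumulator by a two-phase boundary-index-then-slice decomposition (alternative, same cost).

-- ===== PORT A =====
-- line.strip().startswith("Scenario:") — the boundary test both Pythons spell identically
def pvIsScenario (line : String) : Bool :=
  PySem.Str.startswith (PySem.Str.strip line) "Scenario:"

def split_scenarios (gherkin_code : String) : String × List String :=
  let lines := (PySem.Str.split? (PySem.Str.strip gherkin_code) "\n").getD []  -- sep "\\n" ≠ "": split? is always `some` here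
  let st :=
    lines.foldl
      (fun (st : List String × List String × List String) line =>
        let (feature_header, scenarios, current_scenario) := st
        if pvIsScenario line then
          (feature_header,
           (if current_scenario ≠ [] then scenarios ++ [PySem.Str.join "\n" current_scenario] else scenarios),
           [line])
        else if current_scenario ≠ [] then
          (feature_header, scenarios, current_scenario ++ [line])
        else
          (feature_header ++ [line], scenarios, current_scenario))
      ([], [], [])
  let (feature_header, scenarios, current_scenario) := st
  let scenarios :=
    if current_scenario ≠ [] then scenarios ++ [PySem.Str.join "\n" current_scenario] else scenarios
  (PySem.Str.join "\n" feature_header, scenarios)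

-- ===== PORT B =====
def split_scenarios_alt (gherkin_code : String) : String × List String :=
  let lines := (PySem.Str.split? (PySem.Str.strip gherkin_code) "\n").getD []  -- sep "\\n" ≠ "": split? is always `some` here
  let cuts := (PySem.List.enumerate lines 0).filterMap
      (fun p => if pvIsScenario p.2 then some p.1 else none)
  let bounds := cuts ++ [(lines.length : Int)]
  -- bounds is never empty, so bounds[0] is its head
  let header := PySem.Str.join "\n" (PySem.List.slice lines none (some (bounds.headD 0)))
  let scenarios := (bounds.zip bounds.tail).map
      (fun p => PySem.Str.join "\n" (PySem.List.slice lines (some p.1) (some p.2)))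
  (header, scenarios)

-- ===== PRECONDITION & SPEC =====
def Spec_split_scenarios (gherkin_code : String) (out : String × List String) : Prop := out = split_scenarios_alt gherkin_code
instance (gherkin_code : String) (out : String × List String) : Decidable (Spec_split_scenarios gherkin_code out) := by unfold Spec_split_scenarios; infer_instance

-- ===== CLAIM (what is proved, stated in full; the proofs are below) =====
def Claim_equal_split_scenarios : Prop := ∀ (gherkin_code : String), Dom_split_scenarios gherkin_code → Spec_split_scenarios gherkin_code (split_scenarios gherkin_code)


-- ===== LEMMAS AND PROOFS =====

-- the scenario chunks both programs produce, in one structural recursion (proof-side spec)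
def pvSpecScen : List String → List String
  | [] => []
  | l :: ls =>
      if pvIsScenario l then
        PySem.Str.join "\n" (l :: ls.takeWhile (fun x => !pvIsScenario x)) :: pvSpecScen ls
      else pvSpecScen ls

-- B's boundary indices, in Nat
def pvCutsN : List String → Nat → List Nat
  | [], _ => []
  | l :: ls, s => if pvIsScenario l then s :: pvCutsN ls (s+1) else pvCutsN ls (s+1)

def pvNB (ls : List String) : List Nat := pvCutsN ls 0 ++ [ls.length]

def pvScenN (ls : List String) : List String :=
  ((pvNB ls).zip (pvNB ls).tail).map
    (fun p => PySem.Str.join "\n" (PySem.List.slice ls (some (p.1 : Int)) (some (p.2 : Int))))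

theorem pvCutsN_shift (ls : List String) : ∀ s : Nat, pvCutsN ls (s+1) = (pvCutsN ls s).map (· + 1) := by
  induction ls with
  | nil => intro s; simp [pvCutsN]
  | cons l ls ih =>
      intro s
      by_cases h : pvIsScenario l <;> simp [pvCutsN, h, ih (s+1)]

theorem pvCuts_int (ls : List String) : ∀ s : Nat,
    (PySem.List.enumerate ls (s : Int)).filterMap
      (fun p => if pvIsScenario p.2 then some p.1 else none)
      = (pvCutsN ls s).map (fun n : Nat => (n : Int)) := by
  induction ls with
  | nil => intro s; simp [PySem.List.enumerate_nil, pvCutsN]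
  | cons l ls ih =>
      intro s
      rw [PySem.List.enumerate_cons, List.filterMap_cons,
        show ((s : Int) + 1) = (((s + 1 : Nat)) : Int) by push_cast; ring, ih (s+1)]
      by_cases h : pvIsScenario l <;> simp [h, pvCutsN]

theorem pvNB_ne_nil (ls : List String) : pvNB ls ≠ [] := by
  simp [pvNB]

theorem pvNB_cons_pos (l : String) (ls : List String) (h : pvIsScenario l = true) :
    pvNB (l :: ls) = 0 :: (pvNB ls).map (· + 1) := by
  simp [pvNB, pvCutsN, h, pvCutsN_shift ls 0]

theorem pvNB_cons_neg (l : String) (ls : List String) (h : pvIsScenario l = false) :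
    pvNB (l :: ls) = (pvNB ls).map (· + 1) := by
  simp [pvNB, pvCutsN, h, pvCutsN_shift ls 0]

theorem pvNB_headD (ls : List String) :
    (pvNB ls).headD 0 = (ls.takeWhile (fun x => !pvIsScenario x)).length := by
  induction ls with
  | nil => simp [pvNB, pvCutsN]
  | cons l ls ih =>
      by_cases h : pvIsScenario l
      · rw [pvNB_cons_pos l ls h]; simp [h]
      · rw [pvNB_cons_neg l ls (by simp [h])]
        rcases hnb : pvNB ls with _ | ⟨b0, rest⟩
        · exact absurd hnb (pvNB_ne_nil ls)
        · rw [hnb] at ih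
          simp [h, ← ih]

theorem pvSliceShift (l : String) (ls : List String) (a b : Nat) :
    PySem.List.slice (l :: ls) (some ((a + 1 : Nat) : Int)) (some ((b + 1 : Nat) : Int))
      = PySem.List.slice ls (some (a : Int)) (some (b : Int)) := by
  rw [PySem.List.slice_natCast, PySem.List.slice_natCast]
  simp [Nat.add_sub_add_right]

theorem pvZipShift (bs : List Nat) (l : String) (ls : List String) :
    (((bs.map (· + 1)).zip (bs.map (· + 1)).tail).map
      (fun p : Nat × Nat => PySem.Str.join "\n" (PySem.List.slice (l :: ls) (some (p.1 : Int)) (some (p.2 : Int)))))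
    = ((bs.zip bs.tail).map
      (fun p : Nat × Nat => PySem.Str.join "\n" (PySem.List.slice ls (some (p.1 : Int)) (some (p.2 : Int))))) := by
  rw [← List.map_tail, List.zip_map, List.map_map]
  refine List.map_congr_left ?_
  intro p _
  show PySem.Str.join "\n" (PySem.List.slice (l :: ls)
      (some ((p.1 + 1 : Nat) : Int)) (some ((p.2 + 1 : Nat) : Int))) = _
  rw [pvSliceShift l ls p.1 p.2]

theorem pvScenN_eq_spec (ls : List String) : pvScenN ls = pvSpecScen ls := by
  induction ls with
  | nil => simp [pvScenN, pvNB, pvCutsN, pvSpecScen]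
  | cons l ls ih =>
      by_cases h : pvIsScenario l
      · rcases hnb : pvNB ls with _ | ⟨b0, rest⟩
        · exact absurd hnb (pvNB_ne_nil ls)
        · have hb0 : b0 = (ls.takeWhile (fun x => !pvIsScenario x)).length := by
            have := pvNB_headD ls; rw [hnb] at this; simpa using this
          have htake : List.take b0 ls = ls.takeWhile (fun x => !pvIsScenario x) := by
            rw [hb0]
            exact (List.prefix_iff_eq_take.mp (List.takeWhile_prefix _)).symm
          have hrest := pvZipShift (b0 :: rest) l ls
          have ih' : ((b0 :: rest).zip rest).map
              (fun p => PySem.Str.join "\n" (PySem.List.slice ls (some (p.1 : Int)) (some (p.2 : Int))))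
              = pvSpecScen ls := by
            rw [← ih]; unfold pvScenN; rw [hnb]; rfl
          have hhead : PySem.List.slice (l :: ls) (some ((0 : Nat) : Int)) (some ((b0 + 1 : Nat) : Int))
              = l :: ls.takeWhile (fun x => !pvIsScenario x) := by
            rw [PySem.List.slice_natCast]
            simp [htake]
          unfold pvScenN
          rw [pvNB_cons_pos l ls h, hnb, pvSpecScen, if_pos h]
          simp only [List.map_cons, List.tail_cons, List.zip_cons_cons, List.map_cons] at hrest ⊢
          rw [hrest, ih']
          congr 1
          exact congrArg (PySem.Str.join "\n") (by simpa using hhead)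
      · unfold pvScenN
        rw [pvNB_cons_neg l ls (by simp [h])]
        rw [pvZipShift (pvNB ls) l ls, pvSpecScen, if_neg h]
        exact ih

-- ===== A-side: the fold and its invariants =====
def pvStep : (List String × List String × List String) → String → (List String × List String × List String) :=
  fun st line =>
    let (feature_header, scenarios, current_scenario) := st
    if pvIsScenario line then
      (feature_header,
       (if current_scenario ≠ [] then scenarios ++ [PySem.Str.join "\n" current_scenario] else scenarios),
       [line])
    else if current_scenario ≠ [] then
      (feature_header, scenarios, current_scenario ++ [line])
    else
      (feature_header ++ [line], scenarios, current_scenario)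

def pvFinish (st : List String × List String × List String) : String × List String :=
  (PySem.Str.join "\n" st.1,
   if st.2.2 ≠ [] then st.2.1 ++ [PySem.Str.join "\n" st.2.2] else st.2.1)

theorem pvPhase2 (ls : List String) : ∀ (fh sc cur : List String), cur ≠ [] →
    pvFinish (ls.foldl pvStep (fh, sc, cur)) =
      (PySem.Str.join "\n" fh,
       sc ++ PySem.Str.join "\n" (cur ++ ls.takeWhile (fun x => !pvIsScenario x)) :: pvSpecScen ls) := by
  induction ls with
  | nil => intro fh sc cur hcur; simp [pvFinish, pvSpecScen, hcur]
  | cons l ls ih =>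
      intro fh sc cur hcur
      rw [List.foldl_cons]
      by_cases h : pvIsScenario l
      · have hstep : pvStep (fh, sc, cur) l = (fh, sc ++ [PySem.Str.join "\n" cur], [l]) := by
          simp [pvStep, h, hcur]
        rw [hstep, ih _ _ _ (by simp)]
        simp [pvSpecScen, h]
      · have hstep : pvStep (fh, sc, cur) l = (fh, sc, cur ++ [l]) := by
          simp [pvStep, h, hcur]
        rw [hstep, ih _ _ _ (by simp)]
        simp [pvSpecScen, h]

theorem pvPhase1 (ls : List String) : ∀ (fh sc : List String),
    pvFinish (ls.foldl pvStep (fh, sc, [])) =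
      (PySem.Str.join "\n" (fh ++ ls.takeWhile (fun x => !pvIsScenario x)), sc ++ pvSpecScen ls) := by
  induction ls with
  | nil => intro fh sc; simp [pvFinish, pvSpecScen]
  | cons l ls ih =>
      intro fh sc
      rw [List.foldl_cons]
      by_cases h : pvIsScenario l
      · have hstep : pvStep (fh, sc, []) l = (fh, sc, [l]) := by simp [pvStep, h]
        rw [hstep, pvPhase2 ls _ _ _ (by simp)]
        simp [pvSpecScen, h]
      · have hstep : pvStep (fh, sc, []) l = (fh ++ [l], sc, []) := by simp [pvStep, h]
        rw [hstep, ih _ _]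
        simp [pvSpecScen, h]

-- ===== assembly =====
def pvLines (g : String) : List String := (PySem.Str.split? (PySem.Str.strip g) "\n").getD []

def pvAnswer (g : String) : String × List String :=
  (PySem.Str.join "\n" ((pvLines g).takeWhile (fun x => !pvIsScenario x)), pvSpecScen (pvLines g))

theorem pvMapCastZip (lines : List String) :
    ((((pvNB lines).map (fun n : Nat => (n : Int))).zip (((pvNB lines).map (fun n : Nat => (n : Int))).tail)).map
      (fun p : Int × Int => PySem.Str.join "\n" (PySem.List.slice lines (some p.1) (some p.2))))
    = pvScenN lines := by
  rw [← List.map_tail, List.zip_map, List.map_map]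
  rfl

theorem pvA_eq (g : String) : split_scenarios g = pvAnswer g := by
  unfold split_scenarios pvAnswer pvLines
  generalize (PySem.Str.split? (PySem.Str.strip g) "\n").getD [] = L
  show pvFinish (L.foldl pvStep ([], [], [])) = _
  have h := pvPhase1 L [] []
  simpa using h

theorem pvB_eq (g : String) : split_scenarios_alt g = pvAnswer g := by
  unfold split_scenarios_alt pvAnswer pvLines
  generalize (PySem.Str.split? (PySem.Str.strip g) "\n").getD [] = L
  have hcuts := pvCuts_int L 0
  have hbounds : (pvCutsN L 0).map (fun n : Nat => (n : Int)) ++ [(L.length : Int)]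
      = (pvNB L).map (fun n : Nat => (n : Int)) := by
    simp [pvNB]
  rcases hnb : pvNB L with _ | ⟨b0, rest⟩
  · exact absurd hnb (pvNB_ne_nil L)
  · have hb0 : b0 = (L.takeWhile (fun x => !pvIsScenario x)).length := by
      have := pvNB_headD L; rw [hnb] at this; simpa using this
    have htake : List.take b0 L = L.takeWhile (fun x => !pvIsScenario x) := by
      rw [hb0]
      exact (List.prefix_iff_eq_take.mp (List.takeWhile_prefix _)).symm
    have hscen := pvMapCastZip L
    rw [hnb] at hbounds hscen
    show (PySem.Str.join "\n" (PySem.List.slice L none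
            (some ((((PySem.List.enumerate L (((0 : Nat)) : Int)).filterMap
              (fun p => if pvIsScenario p.2 then some p.1 else none)) ++ [(L.length : Int)]).headD 0))),
          ((((PySem.List.enumerate L (((0 : Nat)) : Int)).filterMap
              (fun p => if pvIsScenario p.2 then some p.1 else none)) ++ [(L.length : Int)]).zip
            ((((PySem.List.enumerate L (((0 : Nat)) : Int)).filterMap
              (fun p => if pvIsScenario p.2 then some p.1 else none)) ++ [(L.length : Int)]).tail)).map
            (fun p : Int × Int => PySem.Str.join "\n" (PySem.List.slice L (some p.1) (some p.2))))
        = _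
    rw [hcuts, hbounds, hscen, pvScenN_eq_spec L]
    simp [PySem.List.slice_to_natCast, htake]

-- ===== VERDICT (by name: the statement is the Claim_ definition above) =====
theorem split_scenarios_spec : Claim_equal_split_scenarios := by
  intro g _
  show split_scenarios g = split_scenarios_alt g
  rw [pvA_eq g, pvB_eq g]
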